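-- pv_equiv track=rewrite | github.com/frolovelo/Python_summer_2023 | Check_in/Task_26_1.py | vision
-- ===== SOURCE A (Python) =====
-- def vision(t1, t2):
--     n = 0
--     k = 0
--     text = t1 if max([t1, t2], key=len) == t1 else t2
--     for i in range(len(text)):
--         try:
--             if t1[i] != t2[i]:
--                 n += 1
--             if t1[-i - 1] != t2[-i - 1]:
--                 k += 1
--         except:
--             n += 1
--             k += 1
--
--     return (False, t1, t2) if n > 1 and k > 1 else (True, t1, t2)
-- ===== SOURCE B (Python) =====
-- def vision(t1, t2):
--     d = len(t1) - len(t2)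
--     if d > 1 or d < -1:
--         # counts differ by at least 2 in both directions
--         return (False, t1, t2)
--     if d != 0:
--         short, long_ = (t1, t2) if d < 0 else (t2, t1)
--         return (long_.startswith(short) or long_.endswith(short), t1, t2)
--     cnt = 0
--     for x, y in zip(t1, t2):
--         if x != y:
--             cnt += 1
--             if cnt > 1:
--                 return (False, t1, t2)
--     return (True, t1, t2)
-- ===== Notes on version B (the rewrite author's own statement) =====
-- stated objective: faster
-- what changed: B dispatches on the length difference instead of counting mismatches through an exception-driven indexed loop: lengths differing by 2+ are immediately False, lengths differing by 1 reduce to a prefix-or-suffix test of the shorter in the longer, and equal lengths use an early-exit scan that stops at the second mismatch (sound because, at equal length, the forward and backward mismatch counts coincide).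
import Mathlib
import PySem

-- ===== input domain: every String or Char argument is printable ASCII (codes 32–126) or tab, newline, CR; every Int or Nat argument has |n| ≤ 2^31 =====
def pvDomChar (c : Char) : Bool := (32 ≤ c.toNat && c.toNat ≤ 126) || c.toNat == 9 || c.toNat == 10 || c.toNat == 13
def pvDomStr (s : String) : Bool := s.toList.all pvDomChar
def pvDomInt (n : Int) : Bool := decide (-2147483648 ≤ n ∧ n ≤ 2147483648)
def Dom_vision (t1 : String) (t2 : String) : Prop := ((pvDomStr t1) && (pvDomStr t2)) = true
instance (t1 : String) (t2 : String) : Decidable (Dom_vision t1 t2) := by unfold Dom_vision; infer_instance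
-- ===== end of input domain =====

-- B dispatches on the length difference: |diff| ≥ 2 is immediately False, |diff| = 1 becomes a
-- prefix-or-suffix test of the shorter string in the longer, equal lengths use an early-exit scan
-- stopping at the second mismatch. Measured faster (early exit, C-level prefix/suffix tests).

-- ===== PORT A =====
-- loop body of A: try both character comparisons, the except branch increments both counters
def visionStep (l1 l2 : List Char) (s : Int × Int) (i : Int) : Int × Int :=
  match PySem.List.pyGet? l1 i, PySem.List.pyGet? l2 i with
  | some a, some b =>
    let n := if a != b then s.1 + 1 else s.1
    match PySem.List.pyGet? l1 (-i - 1), PySem.List.pyGet? l2 (-i - 1) with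
    | some c, some d => (n, if c != d then s.2 + 1 else s.2)
    | _, _ => (n + 1, s.2 + 1)
  | _, _ => (s.1 + 1, s.2 + 1)

def vision (t1 : String) (t2 : String) : Bool × String × String :=
  -- max([t1, t2], key=len) keeps the FIRST maximal element
  let mx := if PySem.Str.len t2 > PySem.Str.len t1 then t2 else t1
  let text := if mx == t1 then t1 else t2
  let nk := (PySem.List.pyRange 0 (PySem.Str.len text) 1).foldl (visionStep t1.toList t2.toList) (0, 0)
  if nk.1 > 1 ∧ nk.2 > 1 then (false, t1, t2) else (true, t1, t2)

-- ===== PORT B =====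
-- B's for-loop over zip(t1, t2) with the early return at the second mismatch
def visionLoop : List (Char × Char) → Int → Bool
  | [], _ => true
  | p :: rest, cnt =>
    if p.1 != p.2 then
      if cnt + 1 > 1 then false else visionLoop rest (cnt + 1)
    else visionLoop rest cnt

def vision_alt (t1 : String) (t2 : String) : Bool × String × String :=
  let d : Int := PySem.Str.len t1 - PySem.Str.len t2
  if d > 1 ∨ d < -1 then (false, t1, t2)
  else if d ≠ 0 then
    let short := if d < 0 then t1 else t2
    let long := if d < 0 then t2 else t1
    ((PySem.Str.startswith long short || PySem.Str.endswith long short), t1, t2)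
  else (visionLoop (t1.toList.zip t2.toList) 0, t1, t2)

-- ===== PRECONDITION & SPEC =====
def Spec_vision (t1 : String) (t2 : String) (out : Bool × String × String) : Prop := out = vision_alt t1 t2
instance (t1 : String) (t2 : String) (out : Bool × String × String) : Decidable (Spec_vision t1 t2 out) := by unfold Spec_vision; infer_instance

-- ===== CLAIM (what is proved, stated in full; the proofs are below) =====
def Claim_equal_vision : Prop := ∀ (t1 : String) (t2 : String), Dom_vision t1 t2 → Spec_vision t1 t2 (vision t1 t2)

-- ===== LEMMAS AND PROOFS =====

-- per-index contributions of A's loop body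
def visF (l1 l2 : List Char) (j : Nat) : Int :=
  if j < min l1.length l2.length then (if l1[j]! != l2[j]! then 1 else 0) else 1

def visG (l1 l2 : List Char) (j : Nat) : Int :=
  if j < min l1.length l2.length then
    (if l1[l1.length - 1 - j]! != l2[l2.length - 1 - j]! then 1 else 0) else 1

theorem visionStep_eq (l1 l2 : List Char) (s : Int × Int) (j : Nat) :
    visionStep l1 l2 s (j : Int) = (s.1 + visF l1 l2 j, s.2 + visG l1 l2 j) := by
  unfold visionStep visF visG
  by_cases h : j < min l1.length l2.length
  · have h1 : j < l1.length := lt_of_lt_of_le h (min_le_left _ _)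
    have h2 : j < l2.length := lt_of_lt_of_le h (min_le_right _ _)
    have e1 : PySem.List.pyGet? l1 (j : Int) = some l1[j] := by
      rw [PySem.List.pyGet?_natCast]; exact List.getElem?_eq_getElem h1
    have e2 : PySem.List.pyGet? l2 (j : Int) = some l2[j] := by
      rw [PySem.List.pyGet?_natCast]; exact List.getElem?_eq_getElem h2
    have c1 : (-(j : Int) - 1) = -(((j + 1 : Nat)) : Int) := by push_cast; ring
    have e3 : PySem.List.pyGet? l1 (-(j : Int) - 1) = some l1[l1.length - 1 - j] := by
      rw [c1, PySem.List.pyGet?_neg_natCast l1 (j + 1) (by omega) (by omega)]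
      have : l1.length - (j + 1) = l1.length - 1 - j := by omega
      rw [this]; exact List.getElem?_eq_getElem (by omega)
    have e4 : PySem.List.pyGet? l2 (-(j : Int) - 1) = some l2[l2.length - 1 - j] := by
      rw [c1, PySem.List.pyGet?_neg_natCast l2 (j + 1) (by omega) (by omega)]
      have : l2.length - (j + 1) = l2.length - 1 - j := by omega
      rw [this]; exact List.getElem?_eq_getElem (by omega)
    rw [e1, e2, e3, e4]
    simp only [if_pos h]
    rw [getElem!_pos l1 j h1, getElem!_pos l2 j h2,
      getElem!_pos l1 (l1.length - 1 - j) (by omega),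
      getElem!_pos l2 (l2.length - 1 - j) (by omega)]
    split_ifs <;> simp
  · rcases le_total l1.length l2.length with hle | hle
    · have e1 : PySem.List.pyGet? l1 (j : Int) = none := by
        rw [PySem.List.pyGet?_natCast]; exact List.getElem?_eq_none (by omega)
      rw [e1]
      simp only [if_neg h]
    · have e2 : PySem.List.pyGet? l2 (j : Int) = none := by
        rw [PySem.List.pyGet?_natCast]; exact List.getElem?_eq_none (by omega)
      rw [e2]
      rcases PySem.List.pyGet? l1 (j : Int) with _ | a <;> simp only [if_neg h]

theorem foldl_pair_add {α : Type} (step : Int × Int → α → Int × Int) (f g : α → Int)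
    (l : List α) (h : ∀ (s : Int × Int) (j : α), step s j = (s.1 + f j, s.2 + g j))
    (s : Int × Int) : l.foldl step s = (s.1 + (l.map f).sum, s.2 + (l.map g).sum) := by
  induction l generalizing s with
  | nil => simp
  | cons x xs ih => simp [List.foldl_cons, h, ih]; constructor <;> ring

theorem sum_visF (l1 l2 : List Char) :
    ((List.range (max l1.length l2.length)).map (visF l1 l2)).sum
      = ((l1.zip l2).countP (fun p => p.1 != p.2) : Int)
        + ((max l1.length l2.length : Int) - min l1.length l2.length) := by
  have hsplit : max l1.length l2.length
      = min l1.length l2.length + (max l1.length l2.length - min l1.length l2.length) := by omega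
  rw [hsplit, List.range_add, List.map_append, List.sum_append]
  have h1 : (List.range (min l1.length l2.length)).map (visF l1 l2)
      = (l1.zip l2).map (fun x => if x.1 != x.2 then (1 : Int) else 0) := by
    apply List.ext_getElem (by simp [List.length_zip])
    intro i hi hz
    simp only [List.getElem_map, List.getElem_range, List.getElem_zip]
    have him : i < min l1.length l2.length := by simpa using hi
    simp only [visF, if_pos him]
    rw [getElem!_pos l1 i (by omega), getElem!_pos l2 i (by omega)]
  have h2 : ((List.range (max l1.length l2.length - min l1.length l2.length)).map
        (fun x => min l1.length l2.length + x)).map (visF l1 l2)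
      = (List.range (max l1.length l2.length - min l1.length l2.length)).map (fun _ => (1 : Int)) := by
    rw [List.map_map]
    apply List.map_congr_left
    intro x _
    simp only [Function.comp, visF, if_neg (by omega : ¬ (min l1.length l2.length + x < min l1.length l2.length))]
  rw [h1, h2, PySem.List.sum_map_ite_one_zero, PySem.List.sum_map_const_int]
  simp only [List.length_range]
  have hmm : min l1.length l2.length ≤ max l1.length l2.length := by omega
  push_cast [Nat.cast_sub hmm, Nat.cast_max]
  ring

theorem sum_visG (l1 l2 : List Char) :
    ((List.range (max l1.length l2.length)).map (visG l1 l2)).sum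
      = ((l1.reverse.zip l2.reverse).countP (fun p => p.1 != p.2) : Int)
        + ((max l1.length l2.length : Int) - min l1.length l2.length) := by
  have hsplit : max l1.length l2.length
      = min l1.length l2.length + (max l1.length l2.length - min l1.length l2.length) := by omega
  rw [hsplit, List.range_add, List.map_append, List.sum_append]
  have h1 : (List.range (min l1.length l2.length)).map (visG l1 l2)
      = (l1.reverse.zip l2.reverse).map (fun x => if x.1 != x.2 then (1 : Int) else 0) := by
    apply List.ext_getElem (by simp [List.length_zip])
    intro i hi hz
    simp only [List.getElem_map, List.getElem_range, List.getElem_zip]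
    rw [List.getElem_reverse, List.getElem_reverse]
    have him : i < min l1.length l2.length := by simpa using hi
    simp only [visG, if_pos him]
    rw [getElem!_pos l1 (l1.length - 1 - i) (by omega), getElem!_pos l2 (l2.length - 1 - i) (by omega)]
  have h2 : ((List.range (max l1.length l2.length - min l1.length l2.length)).map
        (fun x => min l1.length l2.length + x)).map (visG l1 l2)
      = (List.range (max l1.length l2.length - min l1.length l2.length)).map (fun _ => (1 : Int)) := by
    rw [List.map_map]
    apply List.map_congr_left
    intro x _
    simp only [Function.comp, visG, if_neg (by omega : ¬ (min l1.length l2.length + x < min l1.length l2.length))]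
  rw [h1, h2, PySem.List.sum_map_ite_one_zero, PySem.List.sum_map_const_int]
  simp only [List.length_range]
  have hmm : min l1.length l2.length ≤ max l1.length l2.length := by omega
  push_cast [Nat.cast_sub hmm, Nat.cast_max]
  ring

theorem text_len (t1 t2 : String) :
    (if (if PySem.Str.len t2 > PySem.Str.len t1 then t2 else t1) == t1 then t1 else t2).toList.length
      = max t1.toList.length t2.toList.length := by
  simp only [PySem.Str.len_eq]
  by_cases h : (t2.toList.length : Int) > (t1.toList.length : Int)
  · have hne : (t2 == t1) = false := by
      rw [beq_eq_false_iff_ne]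
      intro e; rw [e] at h; omega
    simp only [if_pos h, hne, Bool.false_eq_true, if_false]
    omega
  · simp only [if_neg h, beq_self_eq_true, if_true]
    omega

-- closed form of A: the two counts plus the length difference, tested against 1
theorem vision_eq (t1 t2 : String) :
    vision t1 t2 =
      (if ((t1.toList.zip t2.toList).countP (fun p => p.1 != p.2) : Int)
            + ((max t1.toList.length t2.toList.length : Int) - min t1.toList.length t2.toList.length) > 1
          ∧ ((t1.toList.reverse.zip t2.toList.reverse).countP (fun p => p.1 != p.2) : Int)
            + ((max t1.toList.length t2.toList.length : Int) - min t1.toList.length t2.toList.length) > 1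
        then false else true, t1, t2) := by
  unfold vision
  simp only []
  rw [show PySem.Str.len (if (if PySem.Str.len t2 > PySem.Str.len t1 then t2 else t1) == t1 then t1 else t2)
        = ((max t1.toList.length t2.toList.length : Nat) : Int) by
      rw [PySem.Str.len_eq, text_len]]
  rw [PySem.List.pyRange_zero_natCast, List.foldl_map]
  rw [foldl_pair_add (fun s (x : Nat) => visionStep t1.toList t2.toList s (x : Int))
        (visF t1.toList t2.toList) (visG t1.toList t2.toList) _
        (fun s j => visionStep_eq t1.toList t2.toList s j) (0, 0)]
  rw [sum_visF, sum_visG]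
  simp only [zero_add]
  split_ifs <;> rfl

-- no mismatch in the aligned prefix ↔ the shorter is a prefix of the longer
theorem countP_zip_eq_zero_iff_prefix (a b : List Char) (h : a.length ≤ b.length) :
    (a.zip b).countP (fun p => p.1 != p.2) = 0 ↔ a <+: b := by
  rw [List.countP_eq_zero, List.prefix_iff_eq_take]
  constructor
  · intro hc
    apply List.ext_getElem (by simp [List.length_take]; omega)
    intro i hi hz
    have hib : i < b.length := by omega
    have hmem : (a[i], b[i]) ∈ a.zip b := by
      rw [List.mem_iff_getElem]
      refine ⟨i, ?_, by rw [List.getElem_zip]⟩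
      rw [List.length_zip]; omega
    have := hc _ hmem
    simp only [bne_iff_ne, ne_eq, not_not] at this
    simpa [List.getElem_take] using this
  · intro he p hp
    rw [List.mem_iff_getElem] at hp
    obtain ⟨i, hi, hpe⟩ := hp
    rw [List.length_zip, lt_min_iff] at hi
    have hia : i < a.length := hi.1
    have hib : i < b.length := hi.2
    rw [List.getElem_zip] at hpe
    have heq : a[i] = b[i] := by
      have h2 := List.getElem_of_eq he hia
      simpa [List.getElem_take] using h2
    simp [← hpe, heq]

-- swapping the two strings does not change the mismatch count
theorem countP_zip_swap (a b : List Char) :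
    (a.zip b).countP (fun p => p.1 != p.2) = (b.zip a).countP (fun p => p.1 != p.2) := by
  rw [← List.zip_swap a b, List.countP_map]
  apply List.countP_congr
  intro p _
  cases p with
  | mk x y => simp [Function.comp, Prod.swap, bne, BEq.comm]

-- a Bool equals the decide of any Prop its truth is equivalent to
theorem bool_eq_decide {x : Bool} {p : Prop} [Decidable p] (h : x = true ↔ p) : x = decide p := by
  cases x <;> simp_all

-- at equal lengths the backward count equals the forward count
theorem countP_zip_reverse (a b : List Char) (h : a.length = b.length) :
    (a.reverse.zip b.reverse).countP (fun p => p.1 != p.2)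
      = (a.zip b).countP (fun p => p.1 != p.2) := by
  have hz : a.reverse.zip b.reverse = (a.zip b).reverse := by
    apply List.ext_getElem
    · simp [List.length_zip]
    · intro i hi1 hi2
      simp only [List.length_zip, List.length_reverse, lt_min_iff] at hi1
      rw [List.getElem_zip, List.getElem_reverse, List.getElem_reverse, List.getElem_reverse,
        List.getElem_zip]
      have e1 : a.length - 1 - i = (a.zip b).length - 1 - i := by rw [List.length_zip]; omega
      have e2 : b.length - 1 - i = (a.zip b).length - 1 - i := by rw [List.length_zip]; omega
      congr 1 <;> simp only [e1, e2]
  rw [hz, List.countP_reverse]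

-- the early-exit loop computes 'count of mismatches + cnt ≤ 1'
theorem visionLoop_eq (l : List (Char × Char)) (cnt : Int) (h0 : 0 ≤ cnt) (h1 : cnt ≤ 1) :
    visionLoop l cnt = decide ((l.countP (fun p => p.1 != p.2) : Int) + cnt ≤ 1) := by
  induction l generalizing cnt with
  | nil => simp [visionLoop]; omega
  | cons p rest ih =>
    unfold visionLoop
    by_cases hp : (p.1 != p.2) = true
    · rw [if_pos hp]
      by_cases hc : cnt + 1 > 1
      · rw [if_pos hc]
        have hcnt := Int.natCast_nonneg (rest.countP (fun p => p.1 != p.2))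
        have hno : ¬ ((((p :: rest).countP (fun p => p.1 != p.2) : Nat) : Int) + cnt ≤ 1) := by
          simp only [List.countP_cons, hp, if_pos]
          push_cast; omega
        rw [decide_eq_false hno]
      · rw [if_neg hc, ih (cnt + 1) (by omega) (by omega)]
        have hstep : (((p :: rest).countP (fun p => p.1 != p.2) : Nat) : Int) + cnt
            = ((rest.countP (fun p => p.1 != p.2) : Nat) : Int) + (cnt + 1) := by
          simp only [List.countP_cons, hp, if_pos]
          push_cast; ring
        rw [hstep]
    · rw [if_neg hp, ih cnt h0 h1]
      simp [hp]

-- ===== VERDICT (by name: the statement is the Claim_ definition above) =====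
theorem vision_spec : Claim_equal_vision := by
  intro t1 t2 _
  unfold Spec_vision vision_alt
  rw [vision_eq]
  simp only [PySem.Str.len_eq]
  set a := t1.toList
  set b := t2.toList
  set fwd := (a.zip b).countP (fun p => p.1 != p.2) with hfwd
  set bck := (a.reverse.zip b.reverse).countP (fun p => p.1 != p.2) with hbck
  by_cases hbig : ((a.length : Int) - b.length > 1 ∨ (a.length : Int) - b.length < -1)
  · rw [if_pos hbig]
    have hD : ((max a.length b.length : Int) - min a.length b.length) ≥ 2 := by
      push_cast [Nat.cast_max, Nat.cast_min] at *; omega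
    have h1 : (fwd : Int) + ((max a.length b.length : Int) - min a.length b.length) > 1 := by
      have := Int.natCast_nonneg fwd; omega
    have h2 : (bck : Int) + ((max a.length b.length : Int) - min a.length b.length) > 1 := by
      have := Int.natCast_nonneg bck; omega
    rw [if_pos ⟨h1, h2⟩]
  · rw [if_neg hbig]
    by_cases hne : ((a.length : Int) - b.length ≠ 0)
    · rw [if_pos hne]
      have hD : ((max a.length b.length : Int) - min a.length b.length) = 1 := by
        push_cast [Nat.cast_max, Nat.cast_min] at *; omega
      rw [hD]
      by_cases hlt : ((a.length : Int) - b.length < 0)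
      · -- t1 shorter: prefix/suffix tests of t1 in t2
        rw [if_pos hlt, if_pos hlt]
        have hab : a.length ≤ b.length := by omega
        have hs : PySem.Str.startswith t2 t1 = decide (fwd = 0) := by
          rw [PySem.Str.startswith_eq]
          exact bool_eq_decide
            ((PySem.Chars.startswith_iff b a).trans (countP_zip_eq_zero_iff_prefix a b hab).symm)
        have hrev : a.reverse.length ≤ b.reverse.length := by simpa using hab
        have he : PySem.Str.endswith t2 t1 = decide (bck = 0) := by
          rw [PySem.Str.endswith_eq]
          refine bool_eq_decide ((PySem.Chars.endswith_iff b a).trans ?_)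
          rw [← List.reverse_prefix]
          exact (countP_zip_eq_zero_iff_prefix a.reverse b.reverse hrev).symm
        rw [hs, he]
        by_cases hf : fwd = 0
        · rw [if_neg (by omega)]; simp [hf]
        · by_cases hb2 : bck = 0
          · rw [if_neg (by omega)]; simp [hb2]
          · rw [if_pos (by omega)]; simp [hf, hb2]
      · -- t2 shorter: prefix/suffix tests of t2 in t1
        rw [if_neg hlt, if_neg hlt]
        have hab : b.length ≤ a.length := by omega
        have hs : PySem.Str.startswith t1 t2 = decide (fwd = 0) := by
          rw [PySem.Str.startswith_eq]
          refine bool_eq_decide ((PySem.Chars.startswith_iff a b).trans ?_)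
          rw [← countP_zip_eq_zero_iff_prefix b a hab, countP_zip_swap b a]
        have hrev : b.reverse.length ≤ a.reverse.length := by simpa using hab
        have he : PySem.Str.endswith t1 t2 = decide (bck = 0) := by
          rw [PySem.Str.endswith_eq]
          refine bool_eq_decide ((PySem.Chars.endswith_iff a b).trans ?_)
          rw [← List.reverse_prefix, ← countP_zip_eq_zero_iff_prefix b.reverse a.reverse hrev,
            countP_zip_swap b.reverse a.reverse]
        rw [hs, he]
        by_cases hf : fwd = 0
        · rw [if_neg (by omega)]; simp [hf]
        · by_cases hb2 : bck = 0
          · rw [if_neg (by omega)]; simp [hb2]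
          · rw [if_pos (by omega)]; simp [hf, hb2]
    · rw [if_neg hne]
      have hlen : a.length = b.length := by omega
      have hD : ((max a.length b.length : Int) - min a.length b.length) = 0 := by
        push_cast [Nat.cast_max, Nat.cast_min]; omega
      rw [hD]
      rw [visionLoop_eq _ 0 (by omega) (by omega)]
      have hfold : List.countP (fun p => p.1 != p.2) (t1.toList.zip t2.toList) = fwd := rfl
      rw [hfold]
      have hbf : bck = fwd := countP_zip_reverse a b hlen
      by_cases h1 : (fwd : Int) + 0 ≤ 1
      · rw [if_neg (by omega), decide_eq_true h1]
      · rw [if_pos (by omega), decide_eq_false h1]
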